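-- pv_equiv track=rewrite | github.com/yue05x/food-inspection-checker | verifier2(1)/verifier2/verifier2/mcp_client.py | pick_search_tool
-- ===== SOURCE A (Python) =====
-- from typing import Any, Optional
--
-- def pick_search_tool(tools: list[dict[str, Any]]) -> Optional[str]:
--     candidates = []
--     for t in tools:
--         name = (t.get("name") or "").lower()
--         desc = (t.get("description") or "").lower()
--         if "search" in name or "search" in desc:
--             candidates.append(t.get("name"))
--     for preferred in ("tavily_search", "search", "web_search", "tavily.search"):
--         for c in candidates:
--             if c and c.lower() == preferred:
--                 return c
--     return candidates[0] if candidates else None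
-- ===== SOURCE B (Python) =====
-- def pick_search_tool(tools):
--     candidates = []
--     for t in tools:
--         name = (t.get("name") or "").lower()
--         desc = (t.get("description") or "").lower()
--         if "search" in name or "search" in desc:
--             candidates.append(t.get("name"))
--     if not candidates:
--         return None
--     rank = {"tavily_search": 0, "search": 1, "web_search": 2, "tavily.search": 3}
--     return min(candidates, key=lambda c: rank.get(c.lower(), 4) if c else 4)
-- ===== Notes on version B (the rewrite author's own statement) =====
-- stated objective: simpler
-- what changed: The 4x|candidates| nested preference loops plus separate fallback are replaced by a single stable min over the candidates with a rank map (unmatched names rank 4), so one pass replaces the preference scan and the fallback.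
import Mathlib
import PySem

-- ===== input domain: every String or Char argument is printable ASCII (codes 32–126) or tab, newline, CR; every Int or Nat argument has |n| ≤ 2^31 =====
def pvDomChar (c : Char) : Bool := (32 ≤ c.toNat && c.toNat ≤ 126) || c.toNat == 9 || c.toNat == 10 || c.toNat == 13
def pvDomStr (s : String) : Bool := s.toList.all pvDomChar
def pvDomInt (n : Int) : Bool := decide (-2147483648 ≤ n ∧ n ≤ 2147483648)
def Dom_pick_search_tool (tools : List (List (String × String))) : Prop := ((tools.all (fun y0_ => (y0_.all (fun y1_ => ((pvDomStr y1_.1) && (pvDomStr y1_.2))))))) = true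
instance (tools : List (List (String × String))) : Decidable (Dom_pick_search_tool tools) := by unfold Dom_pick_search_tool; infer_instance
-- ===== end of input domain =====

-- B replaces A's nested preference loops + fallback with a single stable min over the
-- candidates keyed by a rank map (objective: simpler, one pass picks the winner).

-- ===== PORT A =====
-- shared candidate-collection loop: IDENTICAL in Source A and Source B (same code in both sources)
def pvCandidates (tools : List (List (String × String))) : List (Option String) :=
  tools.foldl
    (fun acc t =>
      let d := PySem.Dict.mk t
      let name := PySem.Str.lower ((d.get? "name").getD "")
      let desc := PySem.Str.lower ((d.get? "description").getD "")
      if PySem.Str.isIn "search" name || PySem.Str.isIn "search" desc then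
        acc ++ [d.get? "name"]
      else acc)
    []

-- inner 'for c in candidates: if c and c.lower() == preferred: return c'
def pvInner (pref : String) : List (Option String) → Option String
  | [] => none
  | c :: rest =>
    match c with
    | some s => if s ≠ "" && PySem.Str.lower s == pref then some s else pvInner pref rest
    | none => pvInner pref rest

-- outer 'for preferred in (…)' with early return
def pvOuter : List String → List (Option String) → Option String
  | [], _ => none
  | p :: ps, cs =>
    match pvInner p cs with
    | some s => some s
    | none => pvOuter ps cs

def pick_search_tool (tools : List (List (String × String))) : Option String :=
  let candidates := pvCandidates tools
  match pvOuter ["tavily_search", "search", "web_search", "tavily.search"] candidates with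
  | some s => some s
  | none => match candidates with
            | [] => none
            | c :: _ => c

-- ===== PORT B =====
-- Source B's key: 'rank.get(c.lower(), 4) if c else 4'
def pvRank (c : Option String) : Int :=
  match c with
  | some s =>
    if s ≠ "" then
      (PySem.Dict.ofList [("tavily_search", (0:Int)), ("search", 1), ("web_search", 2), ("tavily.search", 3)]).getD (PySem.Str.lower s) 4
    else 4
  | none => 4

def pick_search_tool_alt (tools : List (List (String × String))) : Option String :=
  let candidates := pvCandidates tools
  match candidates with
  | [] => none
  | _ =>
    match PySem.List.min? candidates pvRank with
    | some c => c
    | none => none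

-- ===== PRECONDITION & SPEC =====
def Spec_pick_search_tool (tools : List (List (String × String))) (out : Option String) : Prop := out = pick_search_tool_alt tools
instance (tools : List (List (String × String))) (out : Option String) : Decidable (Spec_pick_search_tool tools out) := by unfold Spec_pick_search_tool; infer_instance

-- ===== CLAIM (what is proved, stated in full; the proofs are below) =====
def Claim_equal_pick_search_tool : Prop := ∀ (tools : List (List (String × String))), Dom_pick_search_tool tools → Spec_pick_search_tool tools (pick_search_tool tools)

-- ===== LEMMAS AND PROOFS =====

def pvMatch (p : String) (c : Option String) : Bool :=
  match c with
  | some s => s ≠ "" && PySem.Str.lower s == p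
  | none => false

def pvM (cs : List (Option String)) : Int :=
  cs.foldl (fun m c => min m (pvRank c)) 4

theorem pvLookup (t : String) :
    (PySem.Dict.ofList [("tavily_search", (0:Int)), ("search", 1), ("web_search", 2), ("tavily.search", 3)]).getD t 4 =
    if t = "tavily_search" then 0 else if t = "search" then 1 else if t = "web_search" then 2
    else if t = "tavily.search" then 3 else 4 := by
  have h : PySem.Dict.ofList [("tavily_search", (0:Int)), ("search", 1), ("web_search", 2), ("tavily.search", 3)]
      = PySem.Dict.mk [("tavily_search", (0:Int)), ("search", 1), ("web_search", 2), ("tavily.search", 3)] := by decide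
  rw [h]
  simp only [PySem.Dict.getD, PySem.Dict.get?_mk_cons]
  split_ifs <;> simp_all [PySem.Dict.get?]

theorem pvRank_bounds (c : Option String) : 0 ≤ pvRank c ∧ pvRank c ≤ 4 := by
  match c with
  | none => simp [pvRank]
  | some s =>
    simp only [pvRank]
    split_ifs with h
    · rw [pvLookup]; split_ifs <;> omega
    · omega

theorem pvRank_le_three_shape (c : Option String) (h : pvRank c ≤ 3) :
    ∃ s, c = some s ∧ s ≠ "" := by
  match c with
  | none => simp [pvRank] at h
  | some s =>
    refine ⟨s, rfl, ?_⟩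
    intro hs
    simp [pvRank, hs] at h

theorem pvMatch_eq_rank (c : Option String) :
    (pvMatch "tavily_search" c = (pvRank c == 0)) ∧
    (pvMatch "search" c = (pvRank c == 1)) ∧
    (pvMatch "web_search" c = (pvRank c == 2)) ∧
    (pvMatch "tavily.search" c = (pvRank c == 3)) := by
  match c with
  | none => simp [pvMatch, pvRank]
  | some s =>
    by_cases hs : s = ""
    · simp [pvMatch, pvRank, hs]
    · simp only [pvMatch, pvRank, hs, if_pos, ne_eq, not_false_eq_true]
      rw [pvLookup]
      split_ifs with h1 h2 h3 h4 <;> simp_all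


theorem pvFoldB (cs : List (Option String)) (a : Int) (h0 : 0 ≤ a) :
    0 ≤ cs.foldl (fun m c => min m (pvRank c)) a ∧
    cs.foldl (fun m c => min m (pvRank c)) a ≤ a := by
  induction cs generalizing a with
  | nil => simp; omega
  | cons c t ih =>
    have hr := pvRank_bounds c
    simp only [List.foldl_cons]
    have := ih (min a (pvRank c)) (by omega)
    exact ⟨this.1, by omega⟩

theorem pvM_bounds (cs : List (Option String)) : 0 ≤ pvM cs ∧ pvM cs ≤ 4 :=
  pvFoldB cs 4 (by omega)

theorem pvM_init (cs : List (Option String)) (a : Int) (ha : a ≤ 4) :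
    cs.foldl (fun m c => min m (pvRank c)) a = min a (pvM cs) := by
  induction cs generalizing a with
  | nil => simp [pvM]; omega
  | cons c t ih =>
    have hr := pvRank_bounds c
    have hb := pvM_bounds t
    simp only [List.foldl_cons, pvM]
    rw [ih _ (by omega), ih _ (by omega : min 4 (pvRank c) ≤ 4)]
    omega

theorem pvM_cons (c : Option String) (t : List (Option String)) :
    pvM (c :: t) = min (pvRank c) (pvM t) := by
  have hr := pvRank_bounds c
  have h := pvM_init t (min 4 (pvRank c)) (by omega)
  simp only [pvM] at h ⊢
  simp only [List.foldl_cons]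
  rw [h]
  omega

theorem pvM_le (cs : List (Option String)) (c : Option String) (hc : c ∈ cs) :
    pvM cs ≤ pvRank c := by
  induction cs with
  | nil => simp at hc
  | cons x t ih =>
    rw [pvM_cons]
    rcases List.mem_cons.1 hc with h | h
    · subst h; omega
    · have := ih h; omega

theorem pvInner_eq_find (p : String) (cs : List (Option String)) :
    pvInner p cs = (cs.find? (pvMatch p)).join := by
  induction cs with
  | nil => simp [pvInner]
  | cons c t ih =>
    match c with
    | none => simpa [pvInner, pvMatch] using ih
    | some s =>
      by_cases h : (s ≠ "" && PySem.Str.lower s == p) = true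
      · rw [List.find?_cons_of_pos (by simpa [pvMatch] using h)]
        simp only [pvInner, h, if_true]
        rfl
      · rw [List.find?_cons_of_neg (by simpa [pvMatch] using h)]
        simp only [pvInner, h, if_neg, Bool.not_eq_true]
        exact ih

theorem pvM_mem (cs : List (Option String)) (h : cs ≠ []) :
    ∃ c ∈ cs, pvRank c = pvM cs := by
  induction cs with
  | nil => simp at h
  | cons c t ih =>
    rw [pvM_cons]
    by_cases ht : t = []
    · subst ht
      exact ⟨c, by simp, by have := pvRank_bounds c; simp [pvM]; omega⟩
    · obtain ⟨x, hx, hr⟩ := ih ht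
      by_cases hc : pvRank c ≤ pvM t
      · exact ⟨c, by simp, by omega⟩
      · exact ⟨x, by simp [hx], by omega⟩

theorem pvFold_min (t : List (Option String)) (b : Option String) :
    t.foldl (fun acc x => match acc with
      | none => some x
      | some m => if pvRank x < pvRank m then some x else some m) (some b)
    = if pvRank b ≤ pvM t then some b else t.find? (fun c => pvRank c == pvM t) := by
  induction t generalizing b with
  | nil =>
    have := pvRank_bounds b
    simp [pvM]
    omega
  | cons c t ih =>
    have hrb := pvRank_bounds b
    have hrc := pvRank_bounds c
    have hbt := pvM_bounds t
    simp only [List.foldl_cons, pvM_cons]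
    by_cases h1 : pvRank c < pvRank b
    · rw [if_pos h1, ih c]
      by_cases h2 : pvRank c ≤ pvM t
      · have hm : min (pvRank c) (pvM t) = pvRank c := by omega
        rw [if_pos h2, hm, if_neg (by omega), List.find?_cons_of_pos (by simp)]
      · have hm : min (pvRank c) (pvM t) = pvM t := by omega
        rw [if_neg h2, hm, if_neg (by omega), List.find?_cons_of_neg (by simp; omega)]
    · rw [if_neg h1, ih b]
      by_cases h2 : pvRank b ≤ pvM t
      · rw [if_pos h2, if_pos (by omega)]
      · have hm : min (pvRank c) (pvM t) = pvM t := by omega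
        rw [if_neg h2, hm, if_neg (by omega), List.find?_cons_of_neg (by simp; omega)]

theorem pvMin_unfold (c : Option String) (t : List (Option String)) :
    PySem.List.min? (c :: t) pvRank
      = t.foldl (fun acc x => match acc with
          | none => some x
          | some m => if pvRank x < pvRank m then some x else some m) (some c) := by
  simp only [PySem.List.min?, List.foldl_cons]
  congr 1
  funext acc x
  cases acc <;> rfl

theorem pvMin_eq_find (c : Option String) (t : List (Option String)) :
    PySem.List.min? (c :: t) pvRank = (c :: t).find? (fun x => pvRank x == pvM (c :: t)) := by
  have hrc := pvRank_bounds c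
  have hbt := pvM_bounds t
  rw [pvMin_unfold, pvFold_min t c, pvM_cons]
  by_cases h : pvRank c ≤ pvM t
  · have hm : min (pvRank c) (pvM t) = pvRank c := by omega
    rw [if_pos h, hm, List.find?_cons_of_pos (by simp)]
  · have hm : min (pvRank c) (pvM t) = pvM t := by omega
    rw [if_neg h, hm, List.find?_cons_of_neg (by simp; omega)]

theorem pvChain_eq_min (cs : List (Option String)) :
    (match pvOuter ["tavily_search", "search", "web_search", "tavily.search"] cs with
     | some s => some s
     | none => match cs with | [] => none | c :: _ => c)
    = (match cs with
       | [] => none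
       | _ => match PySem.List.min? cs pvRank with | some c => c | none => none) := by
  match cs with
  | [] => rfl
  | c :: t =>
    have hb := pvM_bounds (c :: t)
    obtain ⟨x, hx, hrx⟩ := pvM_mem (c :: t) (by simp)
    obtain ⟨w, hw⟩ : ∃ w, (c :: t).find? (fun y => pvRank y == pvM (c :: t)) = some w := by
      have : ((c :: t).find? (fun y => pvRank y == pvM (c :: t))).isSome :=
        List.find?_isSome.mpr ⟨x, hx, by simp [hrx]⟩
      exact Option.isSome_iff_exists.mp this
    have hwrank : pvRank w = pvM (c :: t) := by simpa using List.find?_some hw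
    have hmin : ∀ y ∈ (c :: t), pvM (c :: t) ≤ pvRank y := fun y hy => pvM_le _ y hy
    have hrc := pvRank_bounds c
    have hp0 : pvMatch "tavily_search" = fun y => pvRank y == 0 :=
      funext fun y => (pvMatch_eq_rank y).1
    have hp1 : pvMatch "search" = fun y => pvRank y == 1 :=
      funext fun y => (pvMatch_eq_rank y).2.1
    have hp2 : pvMatch "web_search" = fun y => pvRank y == 2 :=
      funext fun y => (pvMatch_eq_rank y).2.2.1
    have hp3 : pvMatch "tavily.search" = fun y => pvRank y == 3 :=
      funext fun y => (pvMatch_eq_rank y).2.2.2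
    have hnone : ∀ j : Int, j < pvM (c :: t) →
        (c :: t).find? (fun y => pvRank y == j) = none := by
      intro j hj
      apply List.find?_eq_none.mpr
      intro y hy
      have := hmin y hy
      simp only [beq_iff_eq]
      omega
    change (match pvOuter ["tavily_search", "search", "web_search", "tavily.search"] (c :: t) with
        | some s => some s
        | none => c)
      = (match PySem.List.min? (c :: t) pvRank with | some x => x | none => none)
    rw [pvMin_eq_find, hw]
    simp only [pvOuter, pvInner_eq_find, hp0, hp1, hp2, hp3]
    have hm4 : pvM (c :: t) = 0 ∨ pvM (c :: t) = 1 ∨ pvM (c :: t) = 2 ∨ pvM (c :: t) = 3 ∨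
        pvM (c :: t) = 4 := by omega
    rcases hm4 with hm | hm | hm | hm | hm
    · obtain ⟨s, hs, _⟩ := pvRank_le_three_shape w (by omega)
      rw [hm] at hw
      rw [hw, hs]
      rfl
    · obtain ⟨s, hs, _⟩ := pvRank_le_three_shape w (by omega)
      rw [hm] at hw
      rw [hnone 0 (by omega), hw, hs]
      rfl
    · obtain ⟨s, hs, _⟩ := pvRank_le_three_shape w (by omega)
      rw [hm] at hw
      rw [hnone 0 (by omega), hnone 1 (by omega), hw, hs]
      rfl
    · obtain ⟨s, hs, _⟩ := pvRank_le_three_shape w (by omega)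
      rw [hm] at hw
      rw [hnone 0 (by omega), hnone 1 (by omega), hnone 2 (by omega), hw, hs]
      rfl
    · have hwc : w = c := by
        rw [hm] at hw
        have hc4 : pvRank c = 4 := by
          have := hmin c (by simp)
          omega
        rw [List.find?_cons_of_pos (by simp [hc4])] at hw
        exact (Option.some_injective _ hw).symm
      rw [hnone 0 (by omega), hnone 1 (by omega), hnone 2 (by omega), hnone 3 (by omega)]
      simp [hwc]

-- ===== VERDICT (by name: the statement is the Claim_ definition above) =====
theorem pick_search_tool_spec : Claim_equal_pick_search_tool := by
  intro tools _
  unfold Spec_pick_search_tool pick_search_tool pick_search_tool_alt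
  exact pvChain_eq_min (pvCandidates tools)
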